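-- pv_equiv track=rewrite | github.com/MrBrantCode/unitest_baseline | mut_generate/mist_train_cf/cf_41625/solution.py | count_visible_windows
-- ===== SOURCE A (Python) =====
-- def count_visible_windows(windows):
--     visible_windows = 0
--     max_height = 0
--
--     for height in windows:
--         if height > max_height:
--             visible_windows += height
--             max_height = height
--         else:
--             visible_windows += max_height
--
--     return visible_windows
-- ===== SOURCE B (Python) =====
-- def count_visible_windows(windows):
--     n = len(windows)
--     # phase 1: positions where a new strict record height appears
--     records = []
--     best = 0
--     for i, h in enumerate(windows):
--         if h > best:
--             records.append((i, h))
--             best = h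
--     # phase 2: each record dominates the run up to the next record:
--     # it contributes height * run_length
--     total = 0
--     for k in range(len(records)):
--         i, h = records[k]
--         nxt = records[k + 1][0] if k + 1 < len(records) else n
--         total += h * (nxt - i)
--     return total
-- ===== Notes on version B (the rewrite author's own statement) =====
-- stated objective: alternative
-- what changed: B first collects the strict prefix-max records (index, height) and then sums height*run-length products over the gaps between consecutive records, instead of A's per-element running-max accumulation.
import Mathlib
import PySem

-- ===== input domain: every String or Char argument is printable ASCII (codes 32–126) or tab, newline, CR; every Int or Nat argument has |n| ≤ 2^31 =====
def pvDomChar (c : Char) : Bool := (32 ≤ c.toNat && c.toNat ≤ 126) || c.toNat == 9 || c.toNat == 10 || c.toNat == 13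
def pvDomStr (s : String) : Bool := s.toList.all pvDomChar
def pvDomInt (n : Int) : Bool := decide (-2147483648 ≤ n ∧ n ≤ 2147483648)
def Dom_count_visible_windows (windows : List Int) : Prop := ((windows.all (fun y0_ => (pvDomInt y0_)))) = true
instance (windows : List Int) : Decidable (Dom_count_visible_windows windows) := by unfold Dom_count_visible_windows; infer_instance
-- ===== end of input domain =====

-- B replaces A's per-element running-max accumulation by a record/run-length algorithm:
-- collect the strict prefix-max records, then sum height * run-length over the gaps
-- between consecutive records (alternative algorithm, same cost).

-- ===== PORT A =====
def count_visible_windows (windows : List Int) : Int :=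
  (windows.foldl
    (fun (st : Int × Int) height =>
      if height > st.2 then (st.1 + height, height) else (st.1 + st.2, st.2))
    (0, 0)).1

-- ===== PORT B =====
-- phase 1 of Source B: the (index, height) records where a new strict record appears
def pvRecords (best : Int) (i : Int) (ws : List Int) : List (Int × Int) :=
  match ws with
  | [] => []
  | h :: t => if h > best then (i, h) :: pvRecords h (i + 1) t else pvRecords best (i + 1) t

-- phase 2 of Source B: each record contributes height * (next record index (or n) - its index)
def pvGapSum (n : Int) (recs : List (Int × Int)) : Int :=
  match recs with
  | [] => 0
  | [(i, h)] => h * (n - i)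
  | (i, h) :: (j, g) :: t => h * (j - i) + pvGapSum n ((j, g) :: t)

def count_visible_windows_alt (windows : List Int) : Int :=
  pvGapSum (windows.length : Int) (pvRecords 0 0 windows)

-- ===== PRECONDITION & SPEC =====
def Spec_count_visible_windows (windows : List Int) (out : Int) : Prop := out = count_visible_windows_alt windows
instance (windows : List Int) (out : Int) : Decidable (Spec_count_visible_windows windows out) := by unfold Spec_count_visible_windows; infer_instance

-- ===== CLAIM (what is proved, stated in full; the proofs are below) =====
def Claim_equal_count_visible_windows : Prop := ∀ (windows : List Int), Dom_count_visible_windows windows → Spec_count_visible_windows windows (count_visible_windows windows)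

-- ===== LEMMAS AND PROOFS =====

-- proof-only bridge: the table of running maxima (floored at m)
def pvPrefixMax (m : Int) (ws : List Int) : List Int :=
  match ws with
  | [] => []
  | h :: t => max m h :: pvPrefixMax (max m h) t

-- loop invariant for A: the fold from state (s, m) yields s plus the sum of prefix maxima from m
theorem pvFold_eq_sum (ws : List Int) : ∀ (s m : Int),
    (ws.foldl
      (fun (st : Int × Int) height =>
        if height > st.2 then (st.1 + height, height) else (st.1 + st.2, st.2))
      (s, m)).1 = s + (pvPrefixMax m ws).sum := by
  induction ws with
  | nil => intro s m; simp [pvPrefixMax]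
  | cons h t ih =>
    intro s m
    simp only [List.foldl, pvPrefixMax, List.sum_cons]
    by_cases hc : h > m
    · simp [hc, ih, max_eq_right (le_of_lt hc)]; ring
    · simp [hc, ih, max_eq_left (le_of_not_gt hc)]; ring

-- a pending record of height 0 contributes nothing
theorem pvGapSum_zero (n j : Int) (recs : List (Int × Int)) :
    pvGapSum n ((j, 0) :: recs) = pvGapSum n recs := by
  cases recs with
  | nil => simp [pvGapSum]
  | cons p t => cases p; simp [pvGapSum]

-- key invariant: with pending record (j, g) and next index i, the gap sum equals
-- g * (i - j) plus the sum of the prefix maxima from g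
theorem pvGapSum_records (ws : List Int) : ∀ (g j i : Int),
    pvGapSum (i + ws.length) ((j, g) :: pvRecords g i ws)
      = g * (i - j) + (pvPrefixMax g ws).sum := by
  induction ws with
  | nil => intro g j i; simp [pvRecords, pvGapSum, pvPrefixMax]
  | cons h t ih =>
    intro g j i
    by_cases hc : h > g
    · have h1 := ih h i (i + 1)
      simp only [pvRecords, if_pos hc, pvPrefixMax, List.sum_cons, pvGapSum,
        max_eq_right (le_of_lt hc), List.length_cons]
      cases hrec : pvRecords h (i + 1) t with
      | nil =>
        simp only [hrec, pvGapSum] at h1 ⊢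
        push_cast at h1 ⊢; ring_nf at h1 ⊢; linarith
      | cons p u =>
        cases p with
        | mk a b =>
          simp only [hrec, pvGapSum] at h1 ⊢
          push_cast at h1 ⊢; ring_nf at h1 ⊢; linarith
    · have h1 := ih g j (i + 1)
      simp only [pvRecords, if_neg hc, pvPrefixMax, List.sum_cons,
        max_eq_left (le_of_not_gt hc), List.length_cons]
      push_cast at h1 ⊢; ring_nf at h1 ⊢; linarith

-- ===== VERDICT (by name: the statement is the Claim_ definition above) =====
theorem count_visible_windows_spec : Claim_equal_count_visible_windows := by
  intro windows _
  unfold Spec_count_visible_windows count_visible_windows count_visible_windows_alt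
  rw [pvFold_eq_sum windows 0 0, ← pvGapSum_zero (windows.length : Int) 0 (pvRecords 0 0 windows)]
  have := pvGapSum_records windows 0 0 0
  simpa using this.symm
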